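-- pv_equiv track=rewrite | github.com/JaiSharma019/hello-world | Codeforces/Contest Round 1009 Div3/XOR_and_Triangle.py | check
-- ===== SOURCE A (Python) =====
-- def check(x):
--     y = 0
--     for i in range(x):
--         if x + i > (x^i) and x + (x^i) > i and (x^i) + i > x:
--             y = i
--         else:
--             continue
--     if y == 0:
--         return -1
--     else:
--         return y
-- ===== SOURCE B (Python) =====
-- def check(x):
--     if x <= 0:
--         return -1
--     b = 1
--     while b <= x:
--         if x & b:
--             i = (x & ~b) | (b - 1)
--             if (i & x) and (i & ~x):
--                 return i
--         b <<= 1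
--     return -1
-- ===== Notes on version B (the rewrite author's own statement) =====
-- stated objective: faster
-- what changed: A scans all i in range(x) testing the triangle inequality on (x, i, x^i) and keeps the last hit; B reduces the three inequalities to bit predicates (i&x, i&~x, x&~i nonzero) and constructs the maximal i directly by clearing the lowest feasible set bit of x and setting all bits below it, looping over bit positions only.
import Mathlib
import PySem

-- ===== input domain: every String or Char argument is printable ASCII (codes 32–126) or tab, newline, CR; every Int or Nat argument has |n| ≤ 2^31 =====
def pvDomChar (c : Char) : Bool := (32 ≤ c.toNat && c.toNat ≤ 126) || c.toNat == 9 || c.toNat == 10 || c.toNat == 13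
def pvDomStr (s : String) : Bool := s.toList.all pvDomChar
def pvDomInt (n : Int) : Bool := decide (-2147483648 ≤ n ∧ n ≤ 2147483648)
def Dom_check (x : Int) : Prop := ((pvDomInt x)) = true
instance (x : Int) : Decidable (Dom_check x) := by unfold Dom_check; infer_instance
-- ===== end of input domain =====

-- B replaces A's linear scan over range(x) by a greedy over bit positions: the triangle
-- conditions on (x, i, x^i) reduce to bit predicates, and the maximal i is obtained by
-- clearing the lowest feasible set bit of x and setting all bits below it.

-- ===== PORT A =====
def check (x : Int) : Int :=
  let y := (PySem.List.pyRange 0 x 1).foldl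
    (fun y i =>
      if x + i > PySem.Int.bxor x i ∧ x + PySem.Int.bxor x i > i ∧ PySem.Int.bxor x i + i > x
      then i else y) 0
  if y = 0 then -1 else y

-- ===== PORT B =====
-- loop 'while b <= x' of Source B; Python's '~t' is written '-t - 1' (exact) and 'b <<= 1' as '2*b'.
-- The extra argument 'hb' only carries the loop invariant 0 < b needed for termination.
def checkAltLoop (x b : Int) (hb : 0 < b) : Int :=
  if hbx : b ≤ x then
    if PySem.Int.band x b ≠ 0 then
      let i := PySem.Int.bor (PySem.Int.band x (-b - 1)) (b - 1)
      if PySem.Int.band i x ≠ 0 ∧ PySem.Int.band i (-x - 1) ≠ 0 then i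
      else checkAltLoop x (2*b) (by omega)
    else checkAltLoop x (2*b) (by omega)
  else -1
termination_by (x + 1 - b).toNat
decreasing_by all_goals omega

def check_alt (x : Int) : Int :=
  if x ≤ 0 then -1 else checkAltLoop x 1 (by norm_num)

-- ===== PRECONDITION & SPEC =====
def Spec_check (x : Int) (out : Int) : Prop := out = check_alt x
instance (x : Int) (out : Int) : Decidable (Spec_check x out) := by unfold Spec_check; infer_instance

-- ===== CLAIM (what is proved, stated in full; the proofs are below) =====
def Claim_equal_check : Prop := ∀ (x : Int), Dom_check x → Spec_check x (check x)

-- ===== LEMMAS AND PROOFS =====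

-- a + b splits into xor plus twice the carry bits
theorem pvAddSplit : ∀ a b : Nat, a + b = (a ^^^ b) + 2 * (a &&& b) := by
  intro a
  induction a using Nat.strong_induction_on with
  | _ a ih =>
    intro b
    rcases Nat.eq_zero_or_pos a with rfl | ha
    · simp
    · have h1 : a / 2 + b / 2 = (a/2 ^^^ b/2) + 2 * (a/2 &&& b/2) :=
        ih (a/2) (Nat.div_lt_self ha (by norm_num)) (b/2)
      have hx : (a ^^^ b) = 2 * (a/2 ^^^ b/2) + (a ^^^ b) % 2 := by
        rw [← Nat.xor_div_two]; omega
      have hand : (a &&& b) = 2 * (a/2 &&& b/2) + (a &&& b) % 2 := by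
        rw [← Nat.and_div_two]; omega
      have hxm : (a ^^^ b) % 2 = (a + b) % 2 := Nat.xor_mod_two_eq
      have ham : ((a &&& b) % 2 = 1 ↔ (a % 2 = 1 ∧ b % 2 = 1)) := by
        have := Nat.testBit_land a b 0
        simp only [Nat.testBit_zero] at this
        simp [this]
      have h2 : (a &&& b) % 2 = 0 ∨ (a &&& b) % 2 = 1 := Nat.mod_two_eq_zero_or_one _
      omega

-- n's bits split into those shared with m and those not in m
theorem pvAndSplit (n m : Nat) : (n &&& m) + (n &&& (n ^^^ m)) = n := by
  have hx : (n &&& m) ^^^ (n &&& (n ^^^ m)) = n := by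
    apply Nat.eq_of_testBit_eq
    intro i
    simp only [Nat.testBit_xor, Nat.testBit_land]
    cases n.testBit i <;> cases m.testBit i <;> rfl
  have ha : (n &&& m) &&& (n &&& (n ^^^ m)) = 0 := by
    apply Nat.eq_of_testBit_eq
    intro i
    simp only [Nat.testBit_land, Nat.testBit_xor, Nat.zero_testBit]
    cases n.testBit i <;> cases m.testBit i <;> rfl
  have := pvAddSplit (n &&& m) (n &&& (n ^^^ m))
  omega

-- the Nat-level condition equivalent to the three triangle inequalities
abbrev pvP (n m : Nat) : Prop := n &&& m ≠ 0 ∧ m &&& n ≠ m ∧ n &&& m ≠ n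

theorem pvCondIff (n m : Nat) :
    (n + m > (n ^^^ m) ∧ n + (n ^^^ m) > m ∧ (n ^^^ m) + m > n) ↔ pvP n m := by
  have h1 := pvAddSplit n m
  have h2 := pvAddSplit n (n ^^^ m)
  have h3 := pvAddSplit (n ^^^ m) m
  have e2 : n ^^^ (n ^^^ m) = m := Nat.xor_xor_cancel_left ..
  have e3 : (n ^^^ m) ^^^ m = n := Nat.xor_xor_cancel_right ..
  have s2 : (n &&& m) + (n &&& (n ^^^ m)) = n := pvAndSplit n m
  have s3 : (m &&& n) + (m &&& (m ^^^ n)) = m := pvAndSplit m n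
  have c3 : (n ^^^ m) &&& m = m &&& (m ^^^ n) := by
    rw [Nat.land_comm, Nat.xor_comm]
  have cm : m &&& n = n &&& m := Nat.land_comm m n
  rw [e2] at h2; rw [e3] at h3; rw [c3] at h3
  unfold pvP
  omega

-- B's candidate at bit position k, in Nat form (matches the port's  x & ~b | (b-1))
def pvF (n k : Nat) : Nat := (n - (n &&& 2^k)) ||| (2^k - 1)

theorem pvAnd_two_pow_ne (n k : Nat) : (n &&& 2^k ≠ 0) ↔ n.testBit k = true := by
  rw [Nat.and_two_pow]
  cases h : n.testBit k <;> simp [h] <;> positivity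

theorem pvSub_two_pow (n k : Nat) (h : n.testBit k = true) : n - 2^k = n ^^^ 2^k := by
  have hle : 2^k ≤ n := Nat.ge_two_pow_of_testBit h
  have hand : n &&& 2^k = 2^k := by rw [Nat.and_two_pow, h]; simp
  have := pvAddSplit n (2^k)
  omega

theorem pvTestBit_F_lt (n k : Nat) (h : n.testBit k = true) (i : Nat) (hik : i < k) :
    (pvF n k).testBit i = true := by
  have hand : n &&& 2^k = 2^k := by rw [Nat.and_two_pow, h]; simp
  unfold pvF
  rw [hand, pvSub_two_pow n k h]
  simp only [Nat.testBit_lor, Nat.testBit_xor, Nat.testBit_two_pow, Nat.testBit_two_pow_sub_one]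
  simp [hik]

theorem pvTestBit_F_self (n k : Nat) (h : n.testBit k = true) :
    (pvF n k).testBit k = false := by
  have hand : n &&& 2^k = 2^k := by rw [Nat.and_two_pow, h]; simp
  unfold pvF
  rw [hand, pvSub_two_pow n k h]
  simp only [Nat.testBit_lor, Nat.testBit_xor, Nat.testBit_two_pow, Nat.testBit_two_pow_sub_one]
  simp [h]

theorem pvTestBit_F_gt (n k : Nat) (h : n.testBit k = true) (i : Nat) (hik : k < i) :
    (pvF n k).testBit i = n.testBit i := by
  have hand : n &&& 2^k = 2^k := by rw [Nat.and_two_pow, h]; simp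
  unfold pvF
  rw [hand, pvSub_two_pow n k h]
  simp only [Nat.testBit_lor, Nat.testBit_xor, Nat.testBit_two_pow, Nat.testBit_two_pow_sub_one]
  simp [Nat.ne_of_lt hik, Nat.ne_of_gt hik, Nat.lt_asymm hik]

-- B's acceptance condition at bit k, Nat form
abbrev pvQ (n k : Nat) : Prop :=
  n.testBit k = true ∧ pvF n k &&& n ≠ 0 ∧ pvF n k &&& n ≠ pvF n k

theorem pvQ_P (n k : Nat) (hq : pvQ n k) : pvP n (pvF n k) ∧ pvF n k < n := by
  obtain ⟨hbit, hnz, hne⟩ := hq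
  have hfk : (pvF n k).testBit k = false := pvTestBit_F_self n k hbit
  have hlt : pvF n k < n := by
    apply Nat.lt_of_testBit k hfk hbit
    intro j hj
    exact pvTestBit_F_gt n k hbit j hj
  refine ⟨⟨?_, hne, ?_⟩, hlt⟩
  · rw [Nat.land_comm]; exact hnz
  · intro hcon
    have := congrArg (fun t => t.testBit k) hcon
    simp only [Nat.testBit_land, hfk, hbit, Bool.true_and] at this
    exact Bool.false_ne_true this

-- any m < n satisfying pvP is dominated by a valid candidate
theorem pvBound (n m : Nat) (hm : m < n) (hP : pvP n m) :
    ∃ j, pvQ n j ∧ m ≤ pvF n j := by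
  obtain ⟨hp1, hp2, hp3⟩ := hP
  have hne : m ^^^ n ≠ 0 := Nat.xor_ne_zero_iff.mpr (by omega)
  obtain ⟨j, hj, hj'⟩ := Nat.exists_most_significant_bit hne
  have habove : ∀ i, j < i → m.testBit i = n.testBit i := by
    intro i hi
    have := hj' i hi
    simp only [Nat.testBit_xor] at this
    cases hm' : m.testBit i <;> cases hn' : n.testBit i <;> simp_all
  have hdiff : m.testBit j ≠ n.testBit j := by
    simp only [Nat.testBit_xor] at hj
    cases hm' : m.testBit j <;> cases hn' : n.testBit j <;> simp_all
  have hnj : n.testBit j = true := by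
    cases hn' : n.testBit j
    · have hmj : m.testBit j = true := by
        cases hm' : m.testBit j
        · exact absurd (hm'.trans hn'.symm) hdiff
        · rfl
      have : n < m := Nat.lt_of_testBit j hn' hmj (fun i hi => (habove i hi).symm)
      omega
    · rfl
  have hmj : m.testBit j = false := by
    cases hm' : m.testBit j
    · rfl
    · exact absurd (hm'.trans hnj.symm) hdiff
  -- m is a sub-bitset of pvF n j
  have hsub : m &&& pvF n j = m := by
    apply Nat.eq_of_testBit_eq
    intro i
    rw [Nat.testBit_land]
    rcases lt_trichotomy i j with hij | rfl | hij
    · rw [pvTestBit_F_lt n j hnj i hij, Bool.and_true]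
    · rw [hmj, Bool.false_and]
    · rw [pvTestBit_F_gt n j hnj i hij, ← habove i hij]
      cases m.testBit i <;> rfl
  have hle : m ≤ pvF n j := by
    conv_lhs => rw [← hsub]
    exact Nat.and_le_right
  refine ⟨j, ⟨hnj, ?_, ?_⟩, hle⟩
  · -- pvF n j shares a bit with n because m does
    intro hcon
    have h5 : m &&& n = m &&& (pvF n j &&& n) := by rw [← Nat.land_assoc, hsub]
    rw [hcon] at h5
    simp only [Nat.and_zero] at h5
    rw [Nat.land_comm] at h5
    exact hp1 h5
  · -- pvF n j has a bit outside n because m does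
    intro hcon
    have hex : ∃ i, m.testBit i = true ∧ n.testBit i = false := by
      by_contra hno
      push_neg at hno
      apply hp2
      apply Nat.eq_of_testBit_eq
      intro i
      rw [Nat.testBit_land]
      cases hmi : m.testBit i
      · rw [Bool.false_and]
      · have hni := hno i hmi
        have : n.testBit i = true := by
          cases hni2 : n.testBit i
          · exact absurd hni2 hni
          · rfl
        rw [this, Bool.true_and]
    obtain ⟨i, hmi, hni⟩ := hex
    have hfi : (pvF n j).testBit i = true := by
      have h6 := congrArg (fun t => t.testBit i) hsub
      simp only [Nat.testBit_land] at h6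
      cases hf : (pvF n j).testBit i
      · rw [hf, Bool.and_false] at h6
        rw [hmi] at h6
        exact absurd h6.symm (by decide)
      · rfl
    have h7 := congrArg (fun t => t.testBit i) hcon
    simp only [Nat.testBit_land, hfi, hni, Bool.true_and] at h7
    exact Bool.false_ne_true h7

-- candidates at higher set bits are smaller
theorem pvF_anti (n k k' : Nat) (hk : n.testBit k = true) (hk' : n.testBit k' = true)
    (h : k < k') : pvF n k' < pvF n k := by
  apply Nat.lt_of_testBit k' (pvTestBit_F_self n k' hk')
  · rw [pvTestBit_F_gt n k hk k' h]; exact hk'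
  · intro j hj
    rw [pvTestBit_F_gt n k' hk' j hj, pvTestBit_F_gt n k hk j (by omega)]

-- A's fold over range keeps the last (= largest) index satisfying the predicate
def pvG (P : Nat → Prop) [DecidablePred P] : Nat → Nat
  | 0 => 0
  | t + 1 => if P t then t else pvG P t

theorem pvG_spec (P : Nat → Prop) [DecidablePred P] (h0 : ¬ P 0) (t : Nat) :
    (pvG P t = 0 ∧ ∀ m < t, ¬ P m) ∨
    (P (pvG P t) ∧ 0 < pvG P t ∧ pvG P t < t ∧ ∀ m < t, P m → m ≤ pvG P t) := by
  induction t with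
  | zero => left; exact ⟨rfl, by omega⟩
  | succ t ih =>
    by_cases hPt : P t
    · right
      have ht : 0 < t := by
        rcases Nat.eq_zero_or_pos t with rfl | h
        · exact absurd hPt h0
        · exact h
      simp only [pvG, if_pos hPt]
      exact ⟨hPt, ht, by omega, fun m hm _ => by omega⟩
    · simp only [pvG, if_neg hPt]
      rcases ih with ⟨h1, h2⟩ | ⟨h1, h2, h3, h4⟩
      · left
        refine ⟨h1, fun m hm => ?_⟩
        rcases Nat.lt_succ_iff_lt_or_eq.mp hm with hm' | rfl
        · exact h2 m hm'
        · exact hPt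
      · right
        refine ⟨h1, h2, by omega, fun m hm hP => ?_⟩
        rcases Nat.lt_succ_iff_lt_or_eq.mp hm with hm' | rfl
        · exact h4 m hm' hP
        · exact absurd hP hPt

-- the foldl of port A computes pvG
theorem pvFold_eq_G (P : Nat → Prop) [DecidablePred P] (t : Nat) :
    (List.range t).foldl (fun (y : Int) k => if P k then (k : Int) else y) 0 = (pvG P t : Int) := by
  induction t with
  | zero => simp [pvG]
  | succ t ih =>
    rw [List.range_succ, List.foldl_append, ih]
    simp only [List.foldl_cons, List.foldl_nil, pvG]
    split_ifs <;> rfl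

-- band with a negated Nat cast computes the "bits outside" difference
theorem pvBandNot (m p : Nat) : PySem.Int.band (m : Int) (-(p : Int) - 1) = ((m - (m &&& p) : Nat) : Int) := by
  unfold PySem.Int.band
  have h1 : (0 : Int) ≤ (m : Int) := Int.natCast_nonneg m
  have h2 : ¬ (0 : Int) ≤ (-(p : Int) - 1) := by omega
  rw [if_pos h1, if_neg h2]
  congr 1
  have e1 : (m : Int).toNat = m := Int.toNat_natCast m
  have e2 : (-(-(p : Int) - 1) - 1).toNat = p := by omega
  rw [e1, e2]

-- proof-irrelevant congruence for B's loop
theorem pvLoop_congr (x b b' : Int) (hb : 0 < b) (hb' : 0 < b') (h : b = b') :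
    checkAltLoop x b hb = checkAltLoop x b' hb' := by subst h; rfl

-- one unfolding of B's loop, at b = 2^k, in Nat terms
theorem pvLoopStep (n k : Nat) (hb : (0:Int) < ((2^k : Nat) : Int)) (hbx : ((2^k : Nat) : Int) ≤ (n : Int)) :
    checkAltLoop (n : Int) ((2^k : Nat) : Int) hb =
      if pvQ n k then ((pvF n k : Nat) : Int)
      else checkAltLoop (n : Int) ((2^(k+1) : Nat) : Int) (by positivity) := by
  have hxb : PySem.Int.band (n : Int) ((2^k : Nat) : Int) = ((n &&& 2^k : Nat) : Int) :=
    PySem.Int.band_natCast n (2^k)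
  have hi : PySem.Int.bor (PySem.Int.band (n : Int) (-((2^k : Nat) : Int) - 1)) (((2^k : Nat) : Int) - 1)
      = ((pvF n k : Nat) : Int) := by
    rw [pvBandNot n (2^k)]
    have hc : (((2^k : Nat) : Int) - 1) = (((2^k - 1 : Nat)) : Int) := by
      have : (1:Nat) ≤ 2^k := Nat.one_le_two_pow
      omega
    rw [hc, PySem.Int.bor_natCast]
    rfl
  have hfn : PySem.Int.band ((pvF n k : Nat) : Int) (n : Int) = ((pvF n k &&& n : Nat) : Int) :=
    PySem.Int.band_natCast _ n
  have hfnot : PySem.Int.band ((pvF n k : Nat) : Int) (-(n : Int) - 1)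
      = ((pvF n k - (pvF n k &&& n) : Nat) : Int) := pvBandNot _ n
  have hand_le : pvF n k &&& n ≤ pvF n k := Nat.and_le_left
  have h2 : ((2:Int) * ((2^k : Nat) : Int)) = ((2^(k+1) : Nat) : Int) := by
    push_cast [pow_succ]; ring
  rw [checkAltLoop]
  rw [dif_pos hbx]
  simp only [hi, hxb, hfn, hfnot]
  have c1 : (((n &&& 2^k : Nat) : Int) ≠ 0) ↔ n.testBit k = true := by
    rw [Int.natCast_ne_zero]; exact pvAnd_two_pow_ne n k
  have c2 : (((pvF n k &&& n : Nat) : Int) ≠ 0) ↔ pvF n k &&& n ≠ 0 := Int.natCast_ne_zero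
  have c3 : (((pvF n k - (pvF n k &&& n) : Nat) : Int) ≠ 0) ↔ pvF n k &&& n ≠ pvF n k := by
    rw [Int.natCast_ne_zero]; omega
  by_cases hbit : n.testBit k = true
  · rw [if_pos (c1.mpr hbit)]
    by_cases hv : pvF n k &&& n ≠ 0 ∧ pvF n k &&& n ≠ pvF n k
    · rw [if_pos ⟨c2.mpr hv.1, c3.mpr hv.2⟩, if_pos ⟨hbit, hv.1, hv.2⟩]
    · have hq : ¬ pvQ n k := fun h => hv ⟨h.2.1, h.2.2⟩
      rw [if_neg (fun hc => hv ⟨c2.mp hc.1, c3.mp hc.2⟩), if_neg hq]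
      exact pvLoop_congr _ _ _ _ _ h2
  · have hq : ¬ pvQ n k := fun h => hbit h.1
    rw [if_neg (fun hc => hbit (c1.mp hc)), if_neg hq]
    exact pvLoop_congr _ _ _ _ _ h2

-- B's loop from bit k returns the candidate at the first valid bit, else -1
theorem pvLoopSpec (n : Nat) :
    ∀ fuel k, n + 1 - 2^k ≤ fuel → (∀ j, j < k → ¬ pvQ n j) →
    ∀ hb, (∀ h : ∃ j, pvQ n j,
            checkAltLoop (n : Int) ((2^k : Nat) : Int) hb = ((pvF n (Nat.find h) : Nat) : Int)) ∧
          ((¬ ∃ j, pvQ n j) → checkAltLoop (n : Int) ((2^k : Nat) : Int) hb = -1) := by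
  intro fuel
  induction fuel with
  | zero =>
    intro k hfuel hless hb
    have hbig : n < 2^k := by
      have := Nat.one_le_two_pow (n := k)
      omega
    have hnone : ¬ ∃ j, pvQ n j := by
      rintro ⟨j, hj⟩
      have hj2 : 2^j ≤ n := Nat.ge_two_pow_of_testBit hj.1
      have hjk : j < k := by
        by_contra hc
        have : 2^k ≤ 2^j := Nat.pow_le_pow_right (by norm_num) (by omega)
        omega
      exact hless j hjk hj
    refine ⟨fun h => absurd h hnone, fun _ => ?_⟩
    rw [checkAltLoop, dif_neg (by exact_mod_cast by omega)]
  | succ fuel ih =>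
    intro k hfuel hless hb
    by_cases hbx : ((2^k : Nat) : Int) ≤ (n : Int)
    · rw [pvLoopStep n k hb hbx]
      by_cases hq : pvQ n k
      · rw [if_pos hq]
        have hex : ∃ j, pvQ n j := ⟨k, hq⟩
        refine ⟨fun h => ?_, fun hc => absurd hex hc⟩
        have hfind : Nat.find h = k := by
          apply le_antisymm
          · exact Nat.find_le hq
          · by_contra hc
            exact hless (Nat.find h) (by omega) (Nat.find_spec h)
        rw [hfind]
      · rw [if_neg hq]
        apply ih
        · have h1 : 2^k ≤ n := by exact_mod_cast hbx
          have h2 : 2^k < 2^(k+1) := by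
            have : (0:Nat) < 2^k := Nat.two_pow_pos k
            omega
          omega
        · intro j hj
          rcases Nat.lt_succ_iff_lt_or_eq.mp hj with hj' | rfl
          · exact hless j hj'
          · exact hq
    · have hbig : n < 2^k := by exact_mod_cast by omega
      have hnone : ¬ ∃ j, pvQ n j := by
        rintro ⟨j, hj⟩
        have hj2 : 2^j ≤ n := Nat.ge_two_pow_of_testBit hj.1
        have hjk : j < k := by
          by_contra hc
          have : 2^k ≤ 2^j := Nat.pow_le_pow_right (by norm_num) (by omega)
          omega
        exact hless j hjk hj
      refine ⟨fun h => absurd h hnone, fun _ => ?_⟩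
      rw [checkAltLoop, dif_neg hbx]

-- A's loop predicate on Int agrees with pvP on casts
theorem pvCondCast (n m : Nat) :
    ((n : Int) + (m : Int) > PySem.Int.bxor n m ∧
     (n : Int) + PySem.Int.bxor n m > (m : Int) ∧
     PySem.Int.bxor n m + (m : Int) > (n : Int)) ↔ pvP n m := by
  rw [PySem.Int.bxor_natCast]
  rw [← pvCondIff n m]
  constructor
  · rintro ⟨a, b, c⟩
    exact ⟨by exact_mod_cast a, by exact_mod_cast b, by exact_mod_cast c⟩
  · rintro ⟨a, b, c⟩
    exact ⟨by exact_mod_cast a, by exact_mod_cast b, by exact_mod_cast c⟩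

theorem pvP_zero (n : Nat) : ¬ pvP n 0 := by
  unfold pvP
  simp

-- A's value, in terms of pvG
theorem pvCheck_eq (n : Nat) (hn : 0 < n) :
    check (n : Int) = (if pvG (pvP n) n = 0 then -1 else ((pvG (pvP n) n : Nat) : Int)) := by
  unfold check
  have hr : PySem.List.pyRange 0 (n : Int) 1 = (List.range n).map (fun k => ((k : Nat) : Int)) := by
    rw [PySem.List.pyRange_one]
    simp
  rw [hr, List.foldl_map]
  have hcond : ∀ (y : Int) (k : Nat),
      (if (n : Int) + (k : Int) > PySem.Int.bxor n k ∧
          (n : Int) + PySem.Int.bxor n k > (k : Int) ∧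
          PySem.Int.bxor n k + (k : Int) > (n : Int) then ((k : Nat) : Int) else y)
      = (if pvP n k then ((k : Nat) : Int) else y) := by
    intro y k
    by_cases h : pvP n k
    · rw [if_pos h, if_pos ((pvCondCast n k).mpr h)]
    · rw [if_neg h, if_neg (fun hc => h ((pvCondCast n k).mp hc))]
  simp only [hcond]
  rw [pvFold_eq_G (pvP n) n]
  by_cases h : pvG (pvP n) n = 0
  · rw [if_pos h, if_pos (by exact_mod_cast h)]
  · rw [if_neg h, if_neg (by exact_mod_cast h)]

-- ===== VERDICT (by name: the statement is the Claim_ definition above) =====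
theorem check_spec : Claim_equal_check := by
  intro x _
  unfold Spec_check
  by_cases hx : x ≤ 0
  · unfold check check_alt
    rw [PySem.List.pyRange_one_eq_nil hx]
    simp [hx]
  · push_neg at hx
    obtain ⟨n, rfl⟩ : ∃ n : Nat, x = (n : Int) := ⟨x.toNat, by omega⟩
    have hn : 0 < n := by exact_mod_cast hx
    have hloop := pvLoopSpec n (n + 1) 0 (by simp) (by omega) (by norm_num)
    have hone : ((1 : Nat) : Int) = (((2:Nat)^0 : Nat) : Int) := by norm_num
    have hB0 : check_alt (n : Int) = checkAltLoop (n : Int) (((2:Nat)^0 : Nat) : Int) (by norm_num) := by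
      unfold check_alt
      rw [if_neg (by exact_mod_cast by omega : ¬ (n : Int) ≤ 0)]
      exact pvLoop_congr _ _ _ _ _ (by norm_num)
    rw [pvCheck_eq n hn, hB0]
    by_cases hex : ∃ j, pvQ n j
    · rw [hloop.1 hex]
      set j0 := Nat.find hex with hj0
      have hq0 : pvQ n j0 := Nat.find_spec hex
      obtain ⟨hPf, hflt⟩ := pvQ_P n j0 hq0
      rcases pvG_spec (pvP n) (pvP_zero n) n with ⟨h1, h2⟩ | ⟨h1, h2, h3, h4⟩
      · exact absurd hPf (h2 _ hflt)
      · have hge : pvF n j0 ≤ pvG (pvP n) n := h4 _ hflt hPf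
        have hle : pvG (pvP n) n ≤ pvF n j0 := by
          obtain ⟨j, hqj, hmle⟩ := pvBound n (pvG (pvP n) n) h3 h1
          have hj0le : j0 ≤ j := Nat.find_le hqj
          rcases Nat.lt_or_ge j0 j with hlt | hge'
          · have := pvF_anti n j0 j hq0.1 hqj.1 hlt
            omega
          · have hjj : j = j0 := by omega
            rw [hjj] at hmle
            exact hmle
        have heq : pvG (pvP n) n = pvF n j0 := le_antisymm hle hge
        rw [if_neg (by omega), heq]
    · rw [hloop.2 hex]
      rcases pvG_spec (pvP n) (pvP_zero n) n with ⟨h1, h2⟩ | ⟨h1, h2, h3, h4⟩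
      · rw [if_pos h1]
      · exfalso
        obtain ⟨j, hqj, _⟩ := pvBound n (pvG (pvP n) n) h3 h1
        exact hex ⟨j, hqj⟩
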